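-- pv_equiv track=rewrite | github.com/sahilshah9111/Natural-Language-Processing-1 | Assignment.py | syllword
-- ===== SOURCE A (Python) =====
-- def syllword(words):
--     vowels = ['a', 'e', 'i', 'o', 'u']
--     syllables=0
--     for word in words:
--         if word.endswith(('es', 'ed')):
--             pass
--         else:
--             for w in word:
--                 if w.lower() in vowels:
--                     syllables += 1
--     return syllables
-- ===== SOURCE B (Python) =====
-- def syllword(words):
--     # Build a character-frequency table of the kept words (lowercased),
--     # then read off the five vowel counts.
--     freq = {}
--     for word in words:
--         if not word.endswith(('es', 'ed')):
--             for ch in word.lower():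
--                 freq[ch] = freq.get(ch, 0) + 1
--     return sum(freq.get(v, 0) for v in 'aeiou')
-- ===== Notes on version B (the rewrite author's own statement) =====
-- stated objective: alternative
-- what changed: B accumulates a character-frequency dictionary over the kept lowercased words and returns the sum of the five vowel entries, instead of A's per-character vowel-membership test with a running counter.
import Mathlib
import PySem

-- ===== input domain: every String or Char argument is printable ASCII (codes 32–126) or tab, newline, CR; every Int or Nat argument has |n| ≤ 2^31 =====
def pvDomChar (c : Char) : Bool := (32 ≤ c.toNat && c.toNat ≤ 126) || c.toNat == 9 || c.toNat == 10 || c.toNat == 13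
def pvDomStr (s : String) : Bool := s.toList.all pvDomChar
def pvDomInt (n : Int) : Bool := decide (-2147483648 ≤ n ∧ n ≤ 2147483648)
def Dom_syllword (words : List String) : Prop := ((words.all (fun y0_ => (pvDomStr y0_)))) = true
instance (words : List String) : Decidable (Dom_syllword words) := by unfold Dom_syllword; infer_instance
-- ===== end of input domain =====

-- B builds a character-frequency table of the kept (lowercased) words and reads off the
-- five vowel counts, instead of A's per-character membership test (alternative structure).

-- ===== PORT A =====
def syllword (words : List String) : Int :=
  words.foldl (fun syllables word =>
    if PySem.Str.endswith word "es" || PySem.Str.endswith word "ed" then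
      syllables
    else
      word.toList.foldl (fun s w =>
        if PySem.Chars.lowerChar w ∈ (['a', 'e', 'i', 'o', 'u'] : List Char) then s + 1 else s)
        syllables) 0

-- ===== PORT B =====
def syllword_alt (words : List String) : Int :=
  let freq : PySem.Dict Char Int := words.foldl (fun d word =>
    if !(PySem.Str.endswith word "es" || PySem.Str.endswith word "ed") then
      (PySem.Str.lower word).toList.foldl (fun d ch => d.insert ch (d.getD ch 0 + 1)) d
    else d) PySem.Dict.empty
  ((['a', 'e', 'i', 'o', 'u'] : List Char).map (fun v => freq.getD v 0)).sum

-- ===== PRECONDITION & SPEC =====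
def Spec_syllword (words : List String) (out : Int) : Prop := out = syllword_alt words
instance (words : List String) (out : Int) : Decidable (Spec_syllword words out) := by unfold Spec_syllword; infer_instance

-- ===== CLAIM (what is proved, stated in full; the proofs are below) =====
def Claim_equal_syllword : Prop := ∀ (words : List String), Dom_syllword words → Spec_syllword words (syllword words)

-- ===== LEMMAS AND PROOFS =====

def pvVowels : List Char := ['a', 'e', 'i', 'o', 'u']

def pvSkip (w : String) : Bool := PySem.Str.endswith w "es" || PySem.Str.endswith w "ed"

/-- common normal form: per kept word, the count of characters whose lowercase is a vowel -/
def pvN (words : List String) : Int :=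
  (words.map (fun w =>
    if pvSkip w then 0
    else ((w.toList.countP (fun c => decide (PySem.Chars.lowerChar c ∈ pvVowels))) : Int))).sum

theorem pvA_fold (words : List String) (acc : Int) :
    words.foldl (fun syllables word =>
      if PySem.Str.endswith word "es" || PySem.Str.endswith word "ed" then
        syllables
      else
        word.toList.foldl (fun s w =>
          if PySem.Chars.lowerChar w ∈ (['a', 'e', 'i', 'o', 'u'] : List Char) then s + 1 else s)
          syllables) acc = acc + pvN words := by
  induction words generalizing acc with
  | nil => simp [pvN]
  | cons w ws ih =>
    simp only [List.foldl_cons, pvN, List.map_cons, List.sum_cons]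
    cases hc : (PySem.Str.endswith w "es" || PySem.Str.endswith w "ed") with
    | true =>
      rw [if_pos rfl, ih acc]
      have hs : pvSkip w = true := by simpa [pvSkip] using hc
      simp [hs, pvN]
    | false =>
      rw [if_neg (by decide)]
      rw [PySem.List.foldl_ite_add_one
        (fun c => PySem.Chars.lowerChar c ∈ (['a', 'e', 'i', 'o', 'u'] : List Char)) w.toList acc]
      rw [ih]
      have hs : pvSkip w = false := by simpa [pvSkip] using hc
      simp [hs, pvVowels, pvN]
      ring

theorem pvFreq_getD (words : List String) (d : PySem.Dict Char Int) (v : Char) :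
    (words.foldl (fun d word =>
      if !(PySem.Str.endswith word "es" || PySem.Str.endswith word "ed") then
        (PySem.Str.lower word).toList.foldl (fun d ch => d.insert ch (d.getD ch 0 + 1)) d
      else d) d).getD v 0
    = d.getD v 0 + (words.map (fun w =>
        if pvSkip w then 0 else (((PySem.Chars.lower w.toList).count v : Nat) : Int))).sum := by
  induction words generalizing d with
  | nil => simp
  | cons w ws ih =>
    simp only [List.foldl_cons, List.map_cons, List.sum_cons]
    cases hc : (PySem.Str.endswith w "es" || PySem.Str.endswith w "ed") with
    | true =>
      rw [if_neg (by decide), ih]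
      have hs : pvSkip w = true := by simpa [pvSkip] using hc
      simp [hs]
    | false =>
      rw [if_pos (by decide), ih, PySem.Str.toList_lower, PySem.Dict.getD_foldl_insert_add_one]
      have hs : pvSkip w = false := by simpa [pvSkip] using hc
      simp [hs]
      ring

theorem pv_sum_swap {α β : Type} (A : List α) (B : List β) (t : α → β → Int) :
    (A.map (fun a => (B.map (t a)).sum)).sum = (B.map (fun b => (A.map (fun a => t a b)).sum)).sum := by
  induction A with
  | nil => simp
  | cons a A ih =>
    simp only [List.map_cons, List.sum_cons, ih]
    rw [← PySem.List.sum_map_add_int]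

theorem pv_perword (l : List Char) :
    (pvVowels.map (fun v => (((PySem.Chars.lower l).count v : Nat) : Int))).sum
    = ((l.countP (fun c => decide (PySem.Chars.lowerChar c ∈ pvVowels))) : Int) := by
  induction l with
  | nil => simp [pvVowels, PySem.Chars.lower]
  | cons c l ih =>
    simp only [PySem.Chars.lower, List.map_cons] at *
    simp only [List.count_cons, List.countP_cons, pvVowels, List.map_cons, List.sum_cons,
      List.map_nil, List.sum_nil] at *
    push_cast
    by_cases h1 : PySem.Chars.lowerChar c = 'a' <;>
    by_cases h2 : PySem.Chars.lowerChar c = 'e' <;>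
    by_cases h3 : PySem.Chars.lowerChar c = 'i' <;>
    by_cases h4 : PySem.Chars.lowerChar c = 'o' <;>
    by_cases h5 : PySem.Chars.lowerChar c = 'u' <;>
      simp_all <;> omega

theorem pvA_eq (words : List String) : syllword words = pvN words := by
  unfold syllword
  rw [pvA_fold]
  ring

theorem pvB_eq (words : List String) : syllword_alt words = pvN words := by
  unfold syllword_alt
  simp only
  have h : ∀ v : Char,
      (words.foldl (fun d word =>
        if !(PySem.Str.endswith word "es" || PySem.Str.endswith word "ed") then
          (PySem.Str.lower word).toList.foldl (fun d ch => d.insert ch (d.getD ch 0 + 1)) d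
        else d) PySem.Dict.empty).getD v 0
      = (words.map (fun w =>
          if pvSkip w then 0 else (((PySem.Chars.lower w.toList).count v : Nat) : Int))).sum := by
    intro v
    rw [pvFreq_getD]
    simp
  calc ((['a', 'e', 'i', 'o', 'u'] : List Char).map (fun v =>
          (words.foldl (fun d word =>
            if !(PySem.Str.endswith word "es" || PySem.Str.endswith word "ed") then
              (PySem.Str.lower word).toList.foldl (fun d ch => d.insert ch (d.getD ch 0 + 1)) d
            else d) PySem.Dict.empty).getD v 0)).sum
      = (pvVowels.map (fun v => (words.map (fun w =>
          if pvSkip w then 0 else (((PySem.Chars.lower w.toList).count v : Nat) : Int))).sum)).sum := by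
        simp only [h]; rfl
    _ = (words.map (fun w => (pvVowels.map (fun v =>
          if pvSkip w then 0 else (((PySem.Chars.lower w.toList).count v : Nat) : Int))).sum)).sum := by
        exact pv_sum_swap pvVowels words _
    _ = pvN words := by
        unfold pvN
        congr 1
        apply List.map_congr_left
        intro w _
        by_cases hw : pvSkip w = true
        · simp [hw, pvVowels]
        · simp only [hw]
          simpa using pv_perword w.toList

-- ===== VERDICT (by name: the statement is the Claim_ definition above) =====
theorem syllword_spec : Claim_equal_syllword := by
  intro words _
  unfold Spec_syllword
  rw [pvA_eq, pvB_eq]
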